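-- pv_equiv track=rewrite | github.com/beyinsiz1903/acenta-uygulama | backend/app/bootstrap/v1_manifest.py | derive_current_namespace
-- ===== SOURCE A (Python) =====
-- def _starts_with_prefix(path: str, prefix: str) -> bool:
--     return path == prefix or path.startswith(f"{prefix}/")
--
-- def derive_current_namespace(path: str) -> str:
--     known_prefixes = (
--         "/api/v1/mobile",
--         "/api/admin/system",
--         "/api/admin",
--         "/api/auth",
--         "/api/agency",
--         "/api/b2b",
--         "/api/crm",
--         "/api/ops-cases",
--         "/api/ops",
--         "/api/public",
--         "/api/partner-graph",
--         "/api/partner",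
--         "/api/webhook",
--         "/api/settings",
--         "/api/health",
--         "/api/system",
--         "/api/dashboard",
--         "/api/reports",
--         "/api/tenant",
--         "/api/notifications",
--         "/api/inventory",
--         "/api/products",
--         "/api/pricing",
--         "/api/payments",
--         "/api/reservations",
--         "/api/bookings",
--         "/api/marketplace",
--         "/api/finance",
--         "/api/tickets",
--         "/api/webpos",
--         "/api/onboarding",
--         "/api/gdpr",
--         "/storefront",
--         "/web",
--     )
--     for prefix in known_prefixes:
--         if _starts_with_prefix(path, prefix):
--             return prefix
--
--     parts = [segment for segment in path.split("/") if segment]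
--     if not parts:
--         return "/"
--     if parts[0] == "api":
--         if len(parts) == 1:
--             return "/api"
--         return f"/api/{parts[1]}"
--     if len(parts) == 1:
--         return f"/{parts[0]}"
--     return f"/{parts[0]}/{parts[1]}"
-- ===== SOURCE B (Python) =====
-- _DEEP = frozenset({("api", "v1", "mobile"), ("api", "admin", "system")})
--
-- _API = frozenset({
--     "admin", "auth", "agency", "b2b", "crm", "ops-cases", "ops", "public",
--     "partner-graph", "partner", "webhook", "settings", "health", "system",
--     "dashboard", "reports", "tenant", "notifications", "inventory",
--     "products", "pricing", "payments", "reservations", "bookings",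
--     "marketplace", "finance", "tickets", "webpos", "onboarding", "gdpr",
-- })
--
-- _TOP = frozenset({"storefront", "web"})
--
-- def derive_current_namespace(path: str) -> str:
--     pieces = path.split("/")
--     if pieces[0] == "":
--         if len(pieces) >= 4 and (pieces[1], pieces[2], pieces[3]) in _DEEP:
--             return "/" + pieces[1] + "/" + pieces[2] + "/" + pieces[3]
--         if len(pieces) >= 3 and pieces[1] == "api" and pieces[2] in _API:
--             return "/api/" + pieces[2]
--         if len(pieces) >= 2 and pieces[1] in _TOP:
--             return "/" + pieces[1]
--     parts = [segment for segment in pieces if segment][:2]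
--     return "/" + "/".join(parts)
-- ===== Notes on version B (the rewrite author's own statement) =====
-- stated objective: idiomatic
-- what changed: Instead of scanning the 34-entry prefix tuple with a startswith test per entry, B splits the path once on the slash separator and classifies its first segments against three small frozensets (deep three-segment prefixes, api sub-names, top-level names), with the fallback rewritten as a slash-join of the first two nonempty segments.
import Mathlib
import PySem

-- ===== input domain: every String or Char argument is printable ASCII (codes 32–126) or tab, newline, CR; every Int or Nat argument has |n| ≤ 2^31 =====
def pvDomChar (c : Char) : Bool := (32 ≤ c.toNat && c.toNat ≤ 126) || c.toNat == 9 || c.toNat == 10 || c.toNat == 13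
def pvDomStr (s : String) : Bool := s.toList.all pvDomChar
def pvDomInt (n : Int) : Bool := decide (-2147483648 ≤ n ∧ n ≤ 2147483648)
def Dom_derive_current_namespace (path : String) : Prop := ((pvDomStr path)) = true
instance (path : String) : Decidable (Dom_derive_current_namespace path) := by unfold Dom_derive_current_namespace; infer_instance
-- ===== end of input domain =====

-- B replaces A's linear scan of 34 whole-path startswith tests by splitting the path once on '/'
-- and classifying its first segments against three small sets (idiomatic, same fallback result).

-- ===== PORT A =====
-- the tuple known_prefixes, in A's order (ported on List Char to stay kernel-transparent)
def pvKnownPrefixes : List (List Char) :=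
  ["/api/v1/mobile".toList, "/api/admin/system".toList,
   "/api/admin".toList,
   "/api/auth".toList,
   "/api/agency".toList,
   "/api/b2b".toList,
   "/api/crm".toList,
   "/api/ops-cases".toList,
   "/api/ops".toList,
   "/api/public".toList,
   "/api/partner-graph".toList,
   "/api/partner".toList,
   "/api/webhook".toList,
   "/api/settings".toList,
   "/api/health".toList,
   "/api/system".toList,
   "/api/dashboard".toList,
   "/api/reports".toList,
   "/api/tenant".toList,
   "/api/notifications".toList,
   "/api/inventory".toList,
   "/api/products".toList,
   "/api/pricing".toList,
   "/api/payments".toList,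
   "/api/reservations".toList,
   "/api/bookings".toList,
   "/api/marketplace".toList,
   "/api/finance".toList,
   "/api/tickets".toList,
   "/api/webpos".toList,
   "/api/onboarding".toList,
   "/api/gdpr".toList,
   "/storefront".toList, "/web".toList]

-- _starts_with_prefix: path == prefix or path.startswith(prefix + "/")
def pvStarts (path pfx : List Char) : Bool :=
  path == pfx || PySem.Chars.startswith path (pfx ++ ['/'])

-- A's for-loop over known_prefixes, returning at the first matching prefix
def pvFindA (path : List Char) : List (List Char) → Option (List Char)
  | [] => none
  | p :: rest => if pvStarts path p then some p else pvFindA path rest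

-- A's fallback branch chain over the nonempty segments (parts)
def pvBranchA (parts : List (List Char)) : List Char :=
  match parts with
  | [] => "/".toList
  | p0 :: rest =>
    if p0 == "api".toList then
      match rest with
      | [] => "/api".toList
      | p1 :: _ => "/api/".toList ++ p1
    else
      match rest with
      | [] => ['/'] ++ p0
      | p1 :: _ => ['/'] ++ p0 ++ ['/'] ++ p1

-- parts = [segment for segment in path.split("/") if segment], then the branch chain
def pvFallbackA (path : List Char) : List Char :=
  pvBranchA ((PySem.Chars.splitOn path ['/']).filter (fun s => !s.isEmpty))

def derive_current_namespace (path : String) : String :=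
  String.ofList
    (match pvFindA path.toList pvKnownPrefixes with
     | some p => p
     | none => pvFallbackA path.toList)

-- ===== PORT B =====
-- the frozensets _DEEP, _API, _TOP (PySem.Set convention)
def pvDeep : PySem.Set (List Char × List Char × List Char) := PySem.Set.ofList
  [("api".toList, "v1".toList, "mobile".toList), ("api".toList, "admin".toList, "system".toList)]

def pvApiSet : PySem.Set (List Char) := PySem.Set.ofList
  ["admin".toList,
   "auth".toList,
   "agency".toList,
   "b2b".toList,
   "crm".toList,
   "ops-cases".toList,
   "ops".toList,
   "public".toList,
   "partner-graph".toList,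
   "partner".toList,
   "webhook".toList,
   "settings".toList,
   "health".toList,
   "system".toList,
   "dashboard".toList,
   "reports".toList,
   "tenant".toList,
   "notifications".toList,
   "inventory".toList,
   "products".toList,
   "pricing".toList,
   "payments".toList,
   "reservations".toList,
   "bookings".toList,
   "marketplace".toList,
   "finance".toList,
   "tickets".toList,
   "webpos".toList,
   "onboarding".toList,
   "gdpr".toList]

def pvTopSet : PySem.Set (List Char) := PySem.Set.ofList ["storefront".toList, "web".toList]

-- B's fallback: parts = [segment for segment in pieces if segment][:2]; "/" + "/".join(parts)
def pvFallB (pieces : List (List Char)) : List Char :=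
  ['/'] ++ PySem.Chars.join ['/'] ((pieces.filter (fun s => !s.isEmpty)).take 2)

-- B's classifier over pieces = path.split("/"): pieces is never empty, so pieces[0] is headD
-- with an unreachable default; pieces[1..3] are read only under the length guards, as in the Python
def pvClassifyB (pieces : List (List Char)) : List Char :=
  if pieces.headD ['?'] == ([] : List Char) then
    if decide (4 ≤ pieces.length) && PySem.Set.contains pvDeep (pieces.getD 1 [], pieces.getD 2 [], pieces.getD 3 []) then
      ['/'] ++ pieces.getD 1 [] ++ ['/'] ++ pieces.getD 2 [] ++ ['/'] ++ pieces.getD 3 []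
    else if decide (3 ≤ pieces.length) && pieces.getD 1 [] == "api".toList && PySem.Set.contains pvApiSet (pieces.getD 2 []) then
      "/api/".toList ++ pieces.getD 2 []
    else if decide (2 ≤ pieces.length) && PySem.Set.contains pvTopSet (pieces.getD 1 []) then
      ['/'] ++ pieces.getD 1 []
    else pvFallB pieces
  else pvFallB pieces

def derive_current_namespace_alt (path : String) : String :=
  String.ofList (pvClassifyB (PySem.Chars.splitOn path.toList ['/']))

-- ===== PRECONDITION & SPEC =====
def Spec_derive_current_namespace (path : String) (out : String) : Prop := out = derive_current_namespace_alt path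
instance (path : String) (out : String) : Decidable (Spec_derive_current_namespace path out) := by unfold Spec_derive_current_namespace; infer_instance

-- ===== CLAIM (what is proved, stated in full; the proofs are below) =====
def Claim_equal_derive_current_namespace : Prop := ∀ (path : String), Dom_derive_current_namespace path → Spec_derive_current_namespace path (derive_current_namespace path)

-- ===== LEMMAS AND PROOFS =====

theorem starts_iff (path p : List Char) :
    pvStarts path p = true ↔ (path = p ∨ p ++ ['/'] <+: path) := by
  unfold pvStarts
  rw [Bool.or_eq_true, beq_iff_eq, PySem.Chars.startswith_iff]

-- pvSp is a structural model of path.split("/"); pvRnd is "/".join; the lemmas below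
-- characterise A's raw-string boundary test as a condition on the split pieces.
def pvSp : List Char → List (List Char)
  | [] => [[]]
  | c :: rest =>
    if c = '/' then [] :: pvSp rest
    else match pvSp rest with
      | [] => [[c]]
      | p :: ps => (c :: p) :: ps

theorem pvSp_ne_nil (l : List Char) : pvSp l ≠ [] := by
  cases l with
  | nil => simp [pvSp]
  | cons c rest =>
    simp only [pvSp]
    split_ifs
    · simp
    · cases pvSp rest <;> simp

def pvHp (f : List Char) : List (List Char) → List (List Char)
  | [] => [f]
  | p :: ps => (f ++ p) :: ps

theorem go_spec : ∀ (fuel : Nat) (l : List Char), l.length < fuel → ∀ (cur : List Char) (acc : List (List Char)),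
    PySem.Chars.splitOn.go ['/'] fuel l cur acc = acc.reverse ++ pvHp cur.reverse (pvSp l) := by
  intro fuel
  induction fuel with
  | zero => intro l h; omega
  | succ f ih =>
    intro l h cur acc
    cases l with
    | nil => simp [PySem.Chars.splitOn.go, pvSp, pvHp]
    | cons c rest =>
      simp only [PySem.Chars.splitOn.go]
      by_cases hc : c = '/'
      · rw [if_pos (by simp [hc, List.isPrefixOf])]
        rw [show List.drop ([ '/' ] : List Char).length (c :: rest) = rest by simp]
        rw [ih rest (by simp at h; omega) [] (cur.reverse :: acc)]
        have hne := pvSp_ne_nil rest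
        simp [pvSp, hc, pvHp]
        cases hr : pvSp rest with
        | nil => exact absurd hr hne
        | cons p ps => simp
      · rw [if_neg (by simp [List.isPrefixOf]; intro h'; exact hc h'.symm)]
        rw [ih rest (by simp at h; omega) (c :: cur) acc]
        have hne := pvSp_ne_nil rest
        cases hr : pvSp rest with
        | nil => exact absurd hr hne
        | cons p ps => simp [pvSp, hc, hr, pvHp]

theorem splitOn_eq (l : List Char) : PySem.Chars.splitOn l ['/'] = pvSp l := by
  unfold PySem.Chars.splitOn
  rw [go_spec (l.length + 1) l (by omega) [] []]
  have hne := pvSp_ne_nil l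
  cases hr : pvSp l with
  | nil => exact absurd hr hne
  | cons p ps => simp [pvHp]

def pvRnd : List (List Char) → List Char
  | [] => []
  | [p] => p
  | p :: q :: r => p ++ '/' :: pvRnd (q :: r)

theorem rnd_sp (l : List Char) : pvRnd (pvSp l) = l := by
  induction l with
  | nil => rfl
  | cons c rest ih =>
    simp only [pvSp]
    by_cases hc : c = '/'
    · rw [if_pos hc]
      cases hr : pvSp rest with
      | nil => exact absurd hr (pvSp_ne_nil rest)
      | cons p ps =>
        rw [hr] at ih
        simp [pvRnd, ih, hc]
    · rw [if_neg hc]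
      cases hr : pvSp rest with
      | nil => exact absurd hr (pvSp_ne_nil rest)
      | cons p ps =>
        rw [hr] at ih
        cases ps with
        | nil => simp [pvRnd] at ih ⊢; simp [ih]
        | cons q r => simp [pvRnd] at ih ⊢; simp [ih]

theorem sp_noslash {p : List Char} (h : '/' ∉ p) : pvSp p = [p] := by
  induction p with
  | nil => rfl
  | cons c rest ih =>
    simp only [pvSp]
    rw [if_neg (by intro hc; exact h (by simp [hc]))]
    rw [ih (by intro hm; exact h (by simp [hm]))]

theorem sp_append (a b : List Char) : pvSp (a ++ '/' :: b) = pvSp a ++ pvSp b := by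
  induction a with
  | nil => simp [pvSp]
  | cons c a' ih =>
    by_cases hc : c = '/'
    · simp only [List.cons_append, pvSp, if_pos hc, ih]
    · simp only [List.cons_append, pvSp, if_neg hc, ih]
      cases hr : pvSp a' with
      | nil => exact absurd hr (pvSp_ne_nil a')
      | cons p ps => simp

theorem sp_rnd : ∀ (segs : List (List Char)), segs ≠ [] → (∀ s ∈ segs, '/' ∉ s) →
    pvSp (pvRnd segs) = segs := by
  intro segs
  induction segs with
  | nil => intro h; exact absurd rfl h
  | cons p rest ih =>
    intro _ hns
    cases rest with
    | nil => exact sp_noslash (hns p (by simp))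
    | cons q r =>
      show pvSp (p ++ '/' :: pvRnd (q :: r)) = p :: q :: r
      rw [sp_append, sp_noslash (hns p (by simp)), ih (by simp) (fun s hs => hns s (by simp [hs]))]
      rfl

theorem rnd_append : ∀ (a b : List (List Char)), a ≠ [] → b ≠ [] →
    pvRnd (a ++ b) = pvRnd a ++ '/' :: pvRnd b := by
  intro a
  induction a with
  | nil => intro b h; exact absurd rfl h
  | cons p rest ih =>
    intro b _ hb
    cases rest with
    | nil =>
      cases b with
      | nil => exact absurd rfl hb
      | cons x y => rfl
    | cons q r =>
      show pvRnd (p :: (q :: r ++ b)) = pvRnd (p :: q :: r) ++ '/' :: pvRnd b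
      have : pvRnd (p :: (q :: r ++ b)) = p ++ '/' :: pvRnd (q :: r ++ b) := rfl
      rw [this, ih b (by simp) hb]
      simp [pvRnd]

theorem starts_iff_take (cs : List Char) (segs : List (List Char)) (h0 : segs ≠ [])
    (hns : ∀ s ∈ segs, '/' ∉ s) :
    pvStarts cs (pvRnd segs) = true ↔ (pvSp cs).take segs.length = segs := by
  constructor
  · intro h
    rcases (starts_iff _ _).1 h with h | h
    · subst h
      rw [sp_rnd segs h0 hns, List.take_of_length_le (le_refl _)]
    · obtain ⟨t, ht⟩ := h
      have ht' : cs = pvRnd segs ++ '/' :: t := by rw [← ht]; simp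
      subst ht'
      rw [sp_append, sp_rnd segs h0 hns, List.take_left']
      rfl
  · intro h
    have hsplit : pvSp cs = segs ++ (pvSp cs).drop segs.length := by
      conv_lhs => rw [← List.take_append_drop segs.length (pvSp cs)]
      rw [h]
    rw [starts_iff]
    cases hd : (pvSp cs).drop segs.length with
    | nil =>
      left
      rw [hd, List.append_nil] at hsplit
      rw [← rnd_sp cs, hsplit]
    | cons x y =>
      right
      rw [hd] at hsplit
      have := rnd_append segs (x :: y) h0 (by simp)
      rw [← rnd_sp cs, hsplit, this]
      exact ⟨pvRnd (x :: y), by rw [List.append_assoc]; rfl⟩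

theorem starts_eq_decide (cs : List Char) (segs : List (List Char)) (h0 : segs ≠ [])
    (hns : ∀ s ∈ segs, '/' ∉ s) :
    pvStarts cs (pvRnd segs) = decide ((pvSp cs).take segs.length = segs) := by
  have h := starts_iff_take cs segs h0 hns
  by_cases hp : (pvSp cs).take segs.length = segs
  · rw [h.2 hp, hp]
    simp
  · rw [decide_eq_false hp]
    cases hb : pvStarts cs (pvRnd segs) with
    | false => rfl
    | true => exact absurd (h.1 hb) hp

-- the frozensets, evaluated to their element lists
theorem pvDeep_eq : pvDeep = [("api".toList, "v1".toList, "mobile".toList), ("api".toList, "admin".toList, "system".toList)] := by decide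

theorem pvTopSet_eq : pvTopSet = ["storefront".toList, "web".toList] := by decide

theorem pvApiSet_eq : pvApiSet = ["admin".toList, "auth".toList, "agency".toList, "b2b".toList, "crm".toList, "ops-cases".toList, "ops".toList, "public".toList, "partner-graph".toList, "partner".toList, "webhook".toList, "settings".toList, "health".toList, "system".toList, "dashboard".toList, "reports".toList, "tenant".toList, "notifications".toList, "inventory".toList, "products".toList, "pricing".toList, "payments".toList, "reservations".toList, "bookings".toList, "marketplace".toList, "finance".toList, "tickets".toList, "webpos".toList, "onboarding".toList, "gdpr".toList] := by decide

-- A's fallback branch chain equals B's join-based fallback, for any pieces list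
theorem fallback_eq (l : List (List Char)) :
    pvBranchA (l.filter (fun s => !s.isEmpty)) = pvFallB l := by
  unfold pvBranchA pvFallB
  cases hf : l.filter (fun s => !s.isEmpty) with
  | nil => rfl
  | cons a t =>
    cases t with
    | nil =>
      by_cases ha : a = "api".toList
      · subst ha; simp [PySem.Chars.join_singleton]
      · simp [PySem.Chars.join_singleton]
        intro h
        simp [h]
    | cons b r =>
      by_cases ha : a = "api".toList
      · subst ha
        simp [PySem.Chars.join_cons_cons, PySem.Chars.join_singleton]
      · simp [PySem.Chars.join_cons_cons, PySem.Chars.join_singleton]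
        intro h
        simp [h]

set_option maxHeartbeats 4000000 in
theorem ports_eq (path : String) : derive_current_namespace path = derive_current_namespace_alt path := by
  unfold derive_current_namespace derive_current_namespace_alt pvFallbackA pvClassifyB
  rw [splitOn_eq]
  have hM : pvStarts path.toList ("/api/v1/mobile".toList) = decide ((pvSp path.toList).take 4 = [[], "api".toList, "v1".toList, "mobile".toList]) := by
    rw [show ("/api/v1/mobile".toList) = pvRnd [[], "api".toList, "v1".toList, "mobile".toList] from by decide]
    exact starts_eq_decide _ _ (by decide) (by decide)
  have hS : pvStarts path.toList ("/api/admin/system".toList) = decide ((pvSp path.toList).take 4 = [[], "api".toList, "admin".toList, "system".toList]) := by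
    rw [show ("/api/admin/system".toList) = pvRnd [[], "api".toList, "admin".toList, "system".toList] from by decide]
    exact starts_eq_decide _ _ (by decide) (by decide)
  have hA1 : pvStarts path.toList ("/api/admin".toList) = decide ((pvSp path.toList).take 3 = [[], "api".toList, "admin".toList]) := by
    rw [show ("/api/admin".toList) = pvRnd [[], "api".toList, "admin".toList] from by decide]
    exact starts_eq_decide _ _ (by decide) (by decide)
  have hA2 : pvStarts path.toList ("/api/auth".toList) = decide ((pvSp path.toList).take 3 = [[], "api".toList, "auth".toList]) := by
    rw [show ("/api/auth".toList) = pvRnd [[], "api".toList, "auth".toList] from by decide]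
    exact starts_eq_decide _ _ (by decide) (by decide)
  have hA3 : pvStarts path.toList ("/api/agency".toList) = decide ((pvSp path.toList).take 3 = [[], "api".toList, "agency".toList]) := by
    rw [show ("/api/agency".toList) = pvRnd [[], "api".toList, "agency".toList] from by decide]
    exact starts_eq_decide _ _ (by decide) (by decide)
  have hA4 : pvStarts path.toList ("/api/b2b".toList) = decide ((pvSp path.toList).take 3 = [[], "api".toList, "b2b".toList]) := by
    rw [show ("/api/b2b".toList) = pvRnd [[], "api".toList, "b2b".toList] from by decide]
    exact starts_eq_decide _ _ (by decide) (by decide)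
  have hA5 : pvStarts path.toList ("/api/crm".toList) = decide ((pvSp path.toList).take 3 = [[], "api".toList, "crm".toList]) := by
    rw [show ("/api/crm".toList) = pvRnd [[], "api".toList, "crm".toList] from by decide]
    exact starts_eq_decide _ _ (by decide) (by decide)
  have hA6 : pvStarts path.toList ("/api/ops-cases".toList) = decide ((pvSp path.toList).take 3 = [[], "api".toList, "ops-cases".toList]) := by
    rw [show ("/api/ops-cases".toList) = pvRnd [[], "api".toList, "ops-cases".toList] from by decide]
    exact starts_eq_decide _ _ (by decide) (by decide)
  have hA7 : pvStarts path.toList ("/api/ops".toList) = decide ((pvSp path.toList).take 3 = [[], "api".toList, "ops".toList]) := by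
    rw [show ("/api/ops".toList) = pvRnd [[], "api".toList, "ops".toList] from by decide]
    exact starts_eq_decide _ _ (by decide) (by decide)
  have hA8 : pvStarts path.toList ("/api/public".toList) = decide ((pvSp path.toList).take 3 = [[], "api".toList, "public".toList]) := by
    rw [show ("/api/public".toList) = pvRnd [[], "api".toList, "public".toList] from by decide]
    exact starts_eq_decide _ _ (by decide) (by decide)
  have hA9 : pvStarts path.toList ("/api/partner-graph".toList) = decide ((pvSp path.toList).take 3 = [[], "api".toList, "partner-graph".toList]) := by
    rw [show ("/api/partner-graph".toList) = pvRnd [[], "api".toList, "partner-graph".toList] from by decide]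
    exact starts_eq_decide _ _ (by decide) (by decide)
  have hA10 : pvStarts path.toList ("/api/partner".toList) = decide ((pvSp path.toList).take 3 = [[], "api".toList, "partner".toList]) := by
    rw [show ("/api/partner".toList) = pvRnd [[], "api".toList, "partner".toList] from by decide]
    exact starts_eq_decide _ _ (by decide) (by decide)
  have hA11 : pvStarts path.toList ("/api/webhook".toList) = decide ((pvSp path.toList).take 3 = [[], "api".toList, "webhook".toList]) := by
    rw [show ("/api/webhook".toList) = pvRnd [[], "api".toList, "webhook".toList] from by decide]
    exact starts_eq_decide _ _ (by decide) (by decide)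
  have hA12 : pvStarts path.toList ("/api/settings".toList) = decide ((pvSp path.toList).take 3 = [[], "api".toList, "settings".toList]) := by
    rw [show ("/api/settings".toList) = pvRnd [[], "api".toList, "settings".toList] from by decide]
    exact starts_eq_decide _ _ (by decide) (by decide)
  have hA13 : pvStarts path.toList ("/api/health".toList) = decide ((pvSp path.toList).take 3 = [[], "api".toList, "health".toList]) := by
    rw [show ("/api/health".toList) = pvRnd [[], "api".toList, "health".toList] from by decide]
    exact starts_eq_decide _ _ (by decide) (by decide)
  have hA14 : pvStarts path.toList ("/api/system".toList) = decide ((pvSp path.toList).take 3 = [[], "api".toList, "system".toList]) := by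
    rw [show ("/api/system".toList) = pvRnd [[], "api".toList, "system".toList] from by decide]
    exact starts_eq_decide _ _ (by decide) (by decide)
  have hA15 : pvStarts path.toList ("/api/dashboard".toList) = decide ((pvSp path.toList).take 3 = [[], "api".toList, "dashboard".toList]) := by
    rw [show ("/api/dashboard".toList) = pvRnd [[], "api".toList, "dashboard".toList] from by decide]
    exact starts_eq_decide _ _ (by decide) (by decide)
  have hA16 : pvStarts path.toList ("/api/reports".toList) = decide ((pvSp path.toList).take 3 = [[], "api".toList, "reports".toList]) := by
    rw [show ("/api/reports".toList) = pvRnd [[], "api".toList, "reports".toList] from by decide]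
    exact starts_eq_decide _ _ (by decide) (by decide)
  have hA17 : pvStarts path.toList ("/api/tenant".toList) = decide ((pvSp path.toList).take 3 = [[], "api".toList, "tenant".toList]) := by
    rw [show ("/api/tenant".toList) = pvRnd [[], "api".toList, "tenant".toList] from by decide]
    exact starts_eq_decide _ _ (by decide) (by decide)
  have hA18 : pvStarts path.toList ("/api/notifications".toList) = decide ((pvSp path.toList).take 3 = [[], "api".toList, "notifications".toList]) := by
    rw [show ("/api/notifications".toList) = pvRnd [[], "api".toList, "notifications".toList] from by decide]
    exact starts_eq_decide _ _ (by decide) (by decide)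
  have hA19 : pvStarts path.toList ("/api/inventory".toList) = decide ((pvSp path.toList).take 3 = [[], "api".toList, "inventory".toList]) := by
    rw [show ("/api/inventory".toList) = pvRnd [[], "api".toList, "inventory".toList] from by decide]
    exact starts_eq_decide _ _ (by decide) (by decide)
  have hA20 : pvStarts path.toList ("/api/products".toList) = decide ((pvSp path.toList).take 3 = [[], "api".toList, "products".toList]) := by
    rw [show ("/api/products".toList) = pvRnd [[], "api".toList, "products".toList] from by decide]
    exact starts_eq_decide _ _ (by decide) (by decide)
  have hA21 : pvStarts path.toList ("/api/pricing".toList) = decide ((pvSp path.toList).take 3 = [[], "api".toList, "pricing".toList]) := by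
    rw [show ("/api/pricing".toList) = pvRnd [[], "api".toList, "pricing".toList] from by decide]
    exact starts_eq_decide _ _ (by decide) (by decide)
  have hA22 : pvStarts path.toList ("/api/payments".toList) = decide ((pvSp path.toList).take 3 = [[], "api".toList, "payments".toList]) := by
    rw [show ("/api/payments".toList) = pvRnd [[], "api".toList, "payments".toList] from by decide]
    exact starts_eq_decide _ _ (by decide) (by decide)
  have hA23 : pvStarts path.toList ("/api/reservations".toList) = decide ((pvSp path.toList).take 3 = [[], "api".toList, "reservations".toList]) := by
    rw [show ("/api/reservations".toList) = pvRnd [[], "api".toList, "reservations".toList] from by decide]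
    exact starts_eq_decide _ _ (by decide) (by decide)
  have hA24 : pvStarts path.toList ("/api/bookings".toList) = decide ((pvSp path.toList).take 3 = [[], "api".toList, "bookings".toList]) := by
    rw [show ("/api/bookings".toList) = pvRnd [[], "api".toList, "bookings".toList] from by decide]
    exact starts_eq_decide _ _ (by decide) (by decide)
  have hA25 : pvStarts path.toList ("/api/marketplace".toList) = decide ((pvSp path.toList).take 3 = [[], "api".toList, "marketplace".toList]) := by
    rw [show ("/api/marketplace".toList) = pvRnd [[], "api".toList, "marketplace".toList] from by decide]
    exact starts_eq_decide _ _ (by decide) (by decide)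
  have hA26 : pvStarts path.toList ("/api/finance".toList) = decide ((pvSp path.toList).take 3 = [[], "api".toList, "finance".toList]) := by
    rw [show ("/api/finance".toList) = pvRnd [[], "api".toList, "finance".toList] from by decide]
    exact starts_eq_decide _ _ (by decide) (by decide)
  have hA27 : pvStarts path.toList ("/api/tickets".toList) = decide ((pvSp path.toList).take 3 = [[], "api".toList, "tickets".toList]) := by
    rw [show ("/api/tickets".toList) = pvRnd [[], "api".toList, "tickets".toList] from by decide]
    exact starts_eq_decide _ _ (by decide) (by decide)
  have hA28 : pvStarts path.toList ("/api/webpos".toList) = decide ((pvSp path.toList).take 3 = [[], "api".toList, "webpos".toList]) := by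
    rw [show ("/api/webpos".toList) = pvRnd [[], "api".toList, "webpos".toList] from by decide]
    exact starts_eq_decide _ _ (by decide) (by decide)
  have hA29 : pvStarts path.toList ("/api/onboarding".toList) = decide ((pvSp path.toList).take 3 = [[], "api".toList, "onboarding".toList]) := by
    rw [show ("/api/onboarding".toList) = pvRnd [[], "api".toList, "onboarding".toList] from by decide]
    exact starts_eq_decide _ _ (by decide) (by decide)
  have hA30 : pvStarts path.toList ("/api/gdpr".toList) = decide ((pvSp path.toList).take 3 = [[], "api".toList, "gdpr".toList]) := by
    rw [show ("/api/gdpr".toList) = pvRnd [[], "api".toList, "gdpr".toList] from by decide]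
    exact starts_eq_decide _ _ (by decide) (by decide)
  have hT1 : pvStarts path.toList ("/storefront".toList) = decide ((pvSp path.toList).take 2 = [[], "storefront".toList]) := by
    rw [show ("/storefront".toList) = pvRnd [[], "storefront".toList] from by decide]
    exact starts_eq_decide _ _ (by decide) (by decide)
  have hT2 : pvStarts path.toList ("/web".toList) = decide ((pvSp path.toList).take 2 = [[], "web".toList]) := by
    rw [show ("/web".toList) = pvRnd [[], "web".toList] from by decide]
    exact starts_eq_decide _ _ (by decide) (by decide)
  rw [fallback_eq]
  simp only [pvKnownPrefixes, pvFindA, hM, hS, hA1, hA2, hA3, hA4, hA5, hA6, hA7, hA8, hA9, hA10, hA11, hA12, hA13, hA14, hA15, hA16, hA17, hA18, hA19, hA20, hA21, hA22, hA23, hA24, hA25, hA26, hA27, hA28, hA29, hA30, hT1, hT2]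
  clear hM hS hA1 hA2 hA3 hA4 hA5 hA6 hA7 hA8 hA9 hA10 hA11 hA12 hA13 hA14 hA15 hA16 hA17 hA18 hA19 hA20 hA21 hA22 hA23 hA24 hA25 hA26 hA27 hA28 hA29 hA30 hT1 hT2
  have hnil := pvSp_ne_nil path.toList
  apply congrArg String.ofList
  generalize hps : pvSp path.toList = ps at hnil ⊢
  rcases ps with _ | ⟨p0, _ | ⟨p1, _ | ⟨p2, _ | ⟨p3, rest⟩⟩⟩⟩
  · exact absurd rfl hnil
  · simp_all [pvDeep_eq, pvApiSet_eq, pvTopSet_eq]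
  · simp_all [pvDeep_eq, pvApiSet_eq, pvTopSet_eq]
    split_ifs <;> simp_all
  · by_cases h0 : p0 = []
    · subst h0
      by_cases h1 : p1 = "api".toList
      · subst h1
        by_cases h2 : p2 ∈ pvApiSet
        · have hmem := h2
          rw [pvApiSet_eq] at h2
          simp only [List.mem_cons, List.not_mem_nil, or_false] at h2
          rcases h2 with h|h|h|h|h|h|h|h|h|h|h|h|h|h|h|h|h|h|h|h|h|h|h|h|h|h|h|h|h|h <;> subst h <;>
            (have htop : ("api".toList) ∉ pvTopSet := by decide
             simp_all)
        · have hmem := h2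
          rw [pvApiSet_eq] at h2
          simp only [List.mem_cons, List.not_mem_nil, or_false, not_or] at h2
          have htop : ("api".toList) ∉ pvTopSet := by decide
          simp_all
      · by_cases hs : p1 = "storefront".toList
        · subst hs
          have htop : ("storefront".toList) ∈ pvTopSet := by decide
          simp_all
        · by_cases hw : p1 = "web".toList
          · subst hw
            have htop : ("web".toList) ∈ pvTopSet := by decide
            simp_all
          · have hcT : p1 ∉ pvTopSet := by
              rw [pvTopSet_eq]
              simp only [List.mem_cons, List.not_mem_nil, or_false, not_or]
              exact ⟨by simpa using hs, by simpa using hw⟩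
            simp_all
    · simp [h0]
  · by_cases h0 : p0 = []
    · subst h0
      by_cases h1 : p1 = "api".toList
      · subst h1
        by_cases hd1 : p2 = "v1".toList ∧ p3 = "mobile".toList
        · obtain ⟨ha, hb⟩ := hd1
          subst ha; subst hb
          have hdp : ("api".toList, "v1".toList, "mobile".toList) ∈ pvDeep := by decide
          simp_all
        · by_cases hd2 : p2 = "admin".toList ∧ p3 = "system".toList
          · obtain ⟨ha, hb⟩ := hd2
            subst ha; subst hb
            have hdp : ("api".toList, "admin".toList, "system".toList) ∈ pvDeep := by decide
            simp_all
          · have hcD : ("api".toList, p2, p3) ∉ pvDeep := by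
              rw [pvDeep_eq]
              simp only [List.mem_cons, List.not_mem_nil, or_false, not_or, Prod.mk.injEq]
              exact ⟨fun hcon => hd1 ⟨hcon.2.1, hcon.2.2⟩, fun hcon => hd2 ⟨hcon.2.1, hcon.2.2⟩⟩
            by_cases h2 : p2 ∈ pvApiSet
            · have hmem := h2
              rw [pvApiSet_eq] at h2
              simp only [List.mem_cons, List.not_mem_nil, or_false] at h2
              rcases h2 with h|h|h|h|h|h|h|h|h|h|h|h|h|h|h|h|h|h|h|h|h|h|h|h|h|h|h|h|h|h <;> subst h <;> simp_all
            · have hmem := h2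
              rw [pvApiSet_eq] at h2
              simp only [List.mem_cons, List.not_mem_nil, or_false, not_or] at h2
              have htop : ("api".toList) ∉ pvTopSet := by decide
              simp_all
              split_ifs with hv
              · exact absurd hv.2 (hd1 hv.1)
              · rfl
      · by_cases hs : p1 = "storefront".toList
        · subst hs
          have htop : ("storefront".toList) ∈ pvTopSet := by decide
          have hdeep : ("storefront".toList, p2, p3) ∉ pvDeep := by
            rw [pvDeep_eq]
            simp [Prod.ext_iff]
          simp_all
        · by_cases hw : p1 = "web".toList
          · subst hw
            have htop : ("web".toList) ∈ pvTopSet := by decide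
            have hdeep : ("web".toList, p2, p3) ∉ pvDeep := by
              rw [pvDeep_eq]
              simp [Prod.ext_iff]
            simp_all
          · have hcD : (p1, p2, p3) ∉ pvDeep := by
              rw [pvDeep_eq]
              simp only [List.mem_cons, List.not_mem_nil, or_false, not_or, Prod.mk.injEq]
              exact ⟨fun hcon => h1 hcon.1, fun hcon => h1 hcon.1⟩
            have hcT : p1 ∉ pvTopSet := by
              rw [pvTopSet_eq]
              simp only [List.mem_cons, List.not_mem_nil, or_false, not_or]
              exact ⟨by simpa using hs, by simpa using hw⟩
            simp_all
    · simp [h0]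

-- ===== VERDICT (by name: the statement is the Claim_ definition above) =====
theorem derive_current_namespace_spec : Claim_equal_derive_current_namespace := by
  intro path _
  unfold Spec_derive_current_namespace
  exact ports_eq path
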